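-- pv_equiv track=rewrite | github.com/llmofang/tools | src/summarytools/summarytools.py | changeTime
-- ===== SOURCE A (Python) =====
-- import math
--
-- def changeTime(allTime):
--     day = 24*60*60
--     hour = 60*60
--     min = 60
--     if allTime <60:
--         if allTime<10:
--             return "0%d"%math.ceil(allTime)
--         else:
--             return "%d"%math.ceil(allTime)
--     # elif  allTime > day:
--     #     days = divmod(allTime,day)
--     #     return "%d天%s"%(int(days[0]),changeTime(days[1]))
--     elif allTime > hour:
--         hours = divmod(allTime,hour)
--         if hours[0]<10:
--             return '0%d:%s'%(int(hours[0]),changeTime(hours[1]))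
--         else:
--             return '%d:%s'%(int(hours[0]),changeTime(hours[1]))
--     else:
--         mins = divmod(allTime,min)
--         if mins[0]<10:
--             return "0%d:%s"%(int(mins[0]),changeTime(mins[1]))
--         else:
--             return "%d:%s"%(int(mins[0]),changeTime(mins[1]))
-- ===== SOURCE B (Python) =====
-- import math
--
-- def changeTime(allTime):
--     segments = []
--     while True:
--         if allTime < 60:
--             n = math.ceil(allTime)
--             segments.append("0%d" % n if allTime < 10 else "%d" % n)
--             break
--         if allTime > 3600:
--             q, r = divmod(allTime, 3600)
--         else:
--             q, r = divmod(allTime, 60)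
--         segments.append("0%d" % int(q) if int(q) < 10 else "%d" % int(q))
--         allTime = r
--     return ":".join(segments)
-- ===== Notes on version B (the rewrite author's own statement) =====
-- stated objective: alternative
-- what changed: Replaced the recursive peel-and-concatenate formatting with an explicit while-loop that accumulates the unit segments in a list and joins them with ':' once at the end.
import Mathlib
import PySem

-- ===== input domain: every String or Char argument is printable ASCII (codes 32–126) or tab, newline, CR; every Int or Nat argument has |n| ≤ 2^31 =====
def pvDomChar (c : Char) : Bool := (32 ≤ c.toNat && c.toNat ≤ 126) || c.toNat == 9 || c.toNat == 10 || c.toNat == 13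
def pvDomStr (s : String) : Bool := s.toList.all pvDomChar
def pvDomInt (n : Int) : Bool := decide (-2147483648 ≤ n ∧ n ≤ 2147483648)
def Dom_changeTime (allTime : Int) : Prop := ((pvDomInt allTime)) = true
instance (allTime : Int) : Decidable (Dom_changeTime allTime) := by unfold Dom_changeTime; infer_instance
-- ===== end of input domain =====

-- B is an explicit loop accumulating segments joined once at the end, instead of A's recursion; return values proved equal.

-- ===== PORT A =====
-- literal transliteration of A's recursion (math.ceil on an int is the identity, ported as such)
def changeTime (allTime : Int) : String :=
  if allTime < 60 then
    if allTime < 10 then "0" ++ PySem.Int.toStr allTime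
    else PySem.Int.toStr allTime
  else if allTime > 3600 then
    let hours := (PySem.Int.floordiv allTime 3600, PySem.Int.mod allTime 3600)
    if hours.1 < 10 then "0" ++ PySem.Int.toStr hours.1 ++ ":" ++ changeTime hours.2
    else PySem.Int.toStr hours.1 ++ ":" ++ changeTime hours.2
  else
    let mins := (PySem.Int.floordiv allTime 60, PySem.Int.mod allTime 60)
    if mins.1 < 10 then "0" ++ PySem.Int.toStr mins.1 ++ ":" ++ changeTime mins.2
    else PySem.Int.toStr mins.1 ++ ":" ++ changeTime mins.2
termination_by allTime.toNat
decreasing_by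
  all_goals
    have h1 := PySem.Int.mod_nonneg allTime (b := 3600) (by norm_num)
    have h2 := PySem.Int.mod_lt allTime (b := 3600) (by norm_num)
    have h3 := PySem.Int.mod_nonneg allTime (b := 60) (by norm_num)
    have h4 := PySem.Int.mod_lt allTime (b := 60) (by norm_num)
    omega

-- ===== PORT B =====
-- the while-loop of Source B: state = (current time, accumulated segment list)
def changeTimeLoop (t : Int) (segments : List String) : String :=
  if t < 60 then
    PySem.Str.join ":" (segments ++ [if t < 10 then "0" ++ PySem.Int.toStr t else PySem.Int.toStr t])
  else
    let qr := if t > 3600 then (PySem.Int.floordiv t 3600, PySem.Int.mod t 3600)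
              else (PySem.Int.floordiv t 60, PySem.Int.mod t 60)
    changeTimeLoop qr.2
      (segments ++ [if qr.1 < 10 then "0" ++ PySem.Int.toStr qr.1 else PySem.Int.toStr qr.1])
termination_by t.toNat
decreasing_by
  all_goals
    have h1 := PySem.Int.mod_nonneg t (b := 3600) (by norm_num)
    have h2 := PySem.Int.mod_lt t (b := 3600) (by norm_num)
    have h3 := PySem.Int.mod_nonneg t (b := 60) (by norm_num)
    have h4 := PySem.Int.mod_lt t (b := 60) (by norm_num)
    by_cases h : t > 3600 <;> simp [h] <;> omega

def changeTime_alt (allTime : Int) : String :=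
  changeTimeLoop allTime []

-- ===== PRECONDITION & SPEC =====
def Spec_changeTime (allTime : Int) (out : String) : Prop := out = changeTime_alt allTime
instance (allTime : Int) (out : String) : Decidable (Spec_changeTime allTime out) := by unfold Spec_changeTime; infer_instance

-- ===== CLAIM (what is proved, stated in full; the proofs are below) =====
def Claim_equal_changeTime : Prop := ∀ (allTime : Int), Dom_changeTime allTime → Spec_changeTime allTime (changeTime allTime)

-- ===== LEMMAS AND PROOFS =====

-- intercalate with the last two pieces merged (already separated by sep) is the same
theorem intercalate_merge_last {α : Type} (sep a b : List α) (xs : List (List α)) :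
    sep.intercalate (xs ++ [a, b]) = sep.intercalate (xs ++ [a ++ (sep ++ b)]) := by
  induction xs with
  | nil => simp [List.intercalate, List.intersperse]
  | cons x xs ih =>
    cases xs with
    | nil => simp_all [List.intercalate, List.intersperse]
    | cons y ys => simp_all [List.intercalate, List.intersperse]

theorem append_pair {α : Type} (xs : List α) (a b : α) : xs ++ [a] ++ [b] = xs ++ [a, b] := by simp

-- joining with the last two pieces merged (already separated by sep) is the same join
theorem join_merge_last (sep a b : String) (xs : List String) :
    PySem.Str.join sep (xs ++ [a, b]) = PySem.Str.join sep (xs ++ [a ++ sep ++ b]) := by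
  simp [PySem.Str.join, PySem.Chars.join]
  rw [intercalate_merge_last]

theorem changeTimeLoop_eq (t : Int) (segments : List String) :
    changeTimeLoop t segments = PySem.Str.join ":" (segments ++ [changeTime t]) := by
  induction t, segments using changeTimeLoop.induct with
  | case1 t segs h => rw [changeTimeLoop, changeTime]; simp [h]
  | case2 t segs h qr ih =>
      rw [changeTimeLoop, changeTime]
      by_cases h3 : t > 3600
      · simp only [qr, dif_pos h3, dite_eq_ite] at ih
        simp only [h, h3, reduceIte]
        rw [ih, append_pair, join_merge_last]
        split_ifs <;> simp [String.append_assoc]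
      · simp only [qr, dif_neg h3, dite_eq_ite] at ih
        simp only [h, h3, reduceIte]
        rw [ih, append_pair, join_merge_last]
        split_ifs <;> simp [String.append_assoc]

theorem changeTime_spec : Claim_equal_changeTime := by
  intro t _
  unfold Spec_changeTime changeTime_alt
  rw [changeTimeLoop_eq]
  simp [PySem.Str.join, PySem.Chars.join, List.intercalate, String.ofList_toList]
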